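-- pv_equiv track=rewrite | github.com/Ian4Genies/HeadGen | synth_head/core/variation.py | classify_joints
-- ===== SOURCE A (Python) =====
-- def classify_joints(
--     joint_names: list[str],
-- ) -> tuple[list[tuple[str, str]], list[str]]:
--     """Split joints into symmetric pairs and unpaired center joints.
--
--     A pair is any (Left*, Right*) joint whose suffix matches exactly.
--     Everything else — including any unmatched Left/Right joints — falls
--     into the center list.
--
--     Returns:
--         (pairs, center) where pairs is [(left_name, right_name), ...] and
--         center is [name, ...].
--     """
--     lefts = {n for n in joint_names if n.startswith("Left")}
--     rights = {n for n in joint_names if n.startswith("Right")}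
--
--     pairs: list[tuple[str, str]] = []
--     matched_lefts: set[str] = set()
--     matched_rights: set[str] = set()
--
--     for left in sorted(lefts):
--         right = "Right" + left.removeprefix("Left")
--         if right in rights:
--             pairs.append((left, right))
--             matched_lefts.add(left)
--             matched_rights.add(right)
--
--     center = [
--         n for n in joint_names
--         if n not in matched_lefts and n not in matched_rights
--     ]
--
--     return pairs, center
-- ===== SOURCE B (Python) =====
-- def classify_joints(
--     joint_names: list[str],
-- ) -> tuple[list[tuple[str, str]], list[str]]:
--     """Split joints into symmetric pairs and unpaired center joints.
--
--     Sorted-merge algorithm: collect the distinct suffixes of Left* and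
--     Right* names, sort both suffix lists, and walk them with two
--     pointers; equal suffixes yield a pair. Center keeps every name
--     whose suffix is not a common one.
--     """
--     left_sfx = sorted({n[4:] for n in joint_names if n.startswith("Left")})
--     right_sfx = sorted({n[5:] for n in joint_names if n.startswith("Right")})
--
--     pairs: list[tuple[str, str]] = []
--     common: set[str] = set()
--     i = j = 0
--     while i < len(left_sfx) and j < len(right_sfx):
--         a, b = left_sfx[i], right_sfx[j]
--         if a == b:
--             pairs.append(("Left" + a, "Right" + b))
--             common.add(a)
--             i += 1
--             j += 1
--         elif a < b:
--             i += 1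
--         else:
--             j += 1
--
--     center = [
--         n for n in joint_names
--         if not (n.startswith("Left") and n[4:] in common)
--         and not (n.startswith("Right") and n[5:] in common)
--     ]
--     return pairs, center
-- ===== Notes on version B (the rewrite author's own statement) =====
-- stated objective: alternative
-- what changed: Replaces A's hash-set membership test (reconstruct 'Right'+suffix and probe the rights set per sorted left) by a sorted two-pointer merge of the distinct Left- and Right-suffix lists, emitting a pair at each equal-suffix step; center filters by suffix membership in the merged common set instead of matched-name sets.
import Mathlib
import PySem

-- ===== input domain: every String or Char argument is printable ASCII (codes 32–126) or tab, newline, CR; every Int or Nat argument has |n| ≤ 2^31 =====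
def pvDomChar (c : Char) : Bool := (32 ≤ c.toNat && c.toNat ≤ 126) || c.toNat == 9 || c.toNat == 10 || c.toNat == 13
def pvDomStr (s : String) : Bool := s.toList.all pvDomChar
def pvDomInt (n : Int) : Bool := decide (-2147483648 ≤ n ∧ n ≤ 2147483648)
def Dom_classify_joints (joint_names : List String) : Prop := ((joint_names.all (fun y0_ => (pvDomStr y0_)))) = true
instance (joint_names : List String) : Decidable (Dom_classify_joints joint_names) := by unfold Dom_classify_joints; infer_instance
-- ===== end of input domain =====

-- B replaces A's per-left hash probe (reconstruct "Right"+suffix, test in the rights set) by a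
-- two-pointer merge of the two sorted distinct-suffix lists (an alternative algorithm, same cost).

-- ===== PORT A =====
-- n.removeprefix(p)
def pyRemoveprefix (s p : String) : String :=
  if PySem.Str.startswith s p then String.ofList (s.toList.drop p.toList.length) else s

def classify_joints (joint_names : List String) : (List (String × String)) × List String :=
  let lefts : PySem.Set String :=
    PySem.Set.ofList (joint_names.filter (fun n => PySem.Str.startswith n "Left"))
  let rights : PySem.Set String :=
    PySem.Set.ofList (joint_names.filter (fun n => PySem.Str.startswith n "Right"))
  let res := (PySem.List.sorted lefts (fun x => x) false).foldl
    (fun (st : List (String × String) × PySem.Set String × PySem.Set String) left =>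
      let right := "Right" ++ pyRemoveprefix left "Left"
      if PySem.Set.contains rights right then
        (st.1 ++ [(left, right)], PySem.Set.add st.2.1 left, PySem.Set.add st.2.2 right)
      else st)
    ([], PySem.Set.empty, PySem.Set.empty)
  (res.1, joint_names.filter
    (fun n => !(PySem.Set.contains res.2.1 n) && !(PySem.Set.contains res.2.2 n)))

-- ===== PORT B =====
-- the while loop with two pointers; ls[i]/rs[j] are exact via getD because the guard keeps
-- both indices in range
def mergeLoop (ls rs : List String)
    (st : List (String × String) × PySem.Set String) (i j : Nat) :
    List (String × String) × PySem.Set String :=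
  if h : i < ls.length ∧ j < rs.length then
    let a := ls.getD i ""
    let b := rs.getD j ""
    if a = b then
      mergeLoop ls rs (st.1 ++ [("Left" ++ a, "Right" ++ b)], PySem.Set.add st.2 a) (i+1) (j+1)
    else if a < b then
      mergeLoop ls rs st (i+1) j
    else
      mergeLoop ls rs st i (j+1)
  else st
termination_by (ls.length - i) + (rs.length - j)
decreasing_by all_goals omega

def classify_joints_alt (joint_names : List String) : (List (String × String)) × List String :=
  -- n[4:] / n[5:] are exact as toList.drop (non-negative slice from the start)
  let left_sfx := PySem.List.sorted
    (PySem.Set.ofList ((joint_names.filter (fun n => PySem.Str.startswith n "Left")).map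
      (fun n => String.ofList (n.toList.drop 4)))) (fun x => x) false
  let right_sfx := PySem.List.sorted
    (PySem.Set.ofList ((joint_names.filter (fun n => PySem.Str.startswith n "Right")).map
      (fun n => String.ofList (n.toList.drop 5)))) (fun x => x) false
  let res := mergeLoop left_sfx right_sfx ([], PySem.Set.empty) 0 0
  (res.1, joint_names.filter (fun n =>
    !(PySem.Str.startswith n "Left" && PySem.Set.contains res.2 (String.ofList (n.toList.drop 4))) &&
    !(PySem.Str.startswith n "Right" && PySem.Set.contains res.2 (String.ofList (n.toList.drop 5)))))

-- ===== PRECONDITION & SPEC =====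
def Spec_classify_joints (joint_names : List String) (out : (List (String × String)) × List String) : Prop := out = classify_joints_alt joint_names
instance (joint_names : List String) (out : (List (String × String)) × List String) : Decidable (Spec_classify_joints joint_names out) := by unfold Spec_classify_joints; infer_instance

-- ===== CLAIM (what is proved, stated in full; the proofs are below) =====
def Claim_equal_classify_joints : Prop := ∀ (joint_names : List String), Dom_classify_joints joint_names → Spec_classify_joints joint_names (classify_joints joint_names)

-- ===== LEMMAS AND PROOFS =====

-- ---- string facts ----
lemma sLeft_iff (n : String) :
    PySem.Str.startswith n "Left" = true ↔ ∃ t : String, n = "Left" ++ t := by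
  simp only [PySem.Str.startswith_eq, PySem.Chars.startswith_iff]
  constructor
  · rintro ⟨t, ht⟩
    exact ⟨String.ofList t, String.toList_inj.mp (by simp [← ht])⟩
  · rintro ⟨t, rfl⟩
    exact ⟨t.toList, by simp⟩

lemma sRight_iff (n : String) :
    PySem.Str.startswith n "Right" = true ↔ ∃ t : String, n = "Right" ++ t := by
  simp only [PySem.Str.startswith_eq, PySem.Chars.startswith_iff]
  constructor
  · rintro ⟨t, ht⟩
    exact ⟨String.ofList t, String.toList_inj.mp (by simp [← ht])⟩
  · rintro ⟨t, rfl⟩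
    exact ⟨t.toList, by simp⟩

lemma sfx_left (t : String) : String.ofList (("Left" ++ t).toList.drop 4) = t := by
  apply String.toList_inj.mp; simp

lemma sfx_right (t : String) : String.ofList (("Right" ++ t).toList.drop 5) = t := by
  apply String.toList_inj.mp; simp

lemma left_ne_right (a b : String) : ("Left" ++ a : String) ≠ "Right" ++ b := by
  intro h
  have := congrArg String.toList h
  simp at this

lemma left_inj {a b : String} : ("Left" ++ a : String) = "Left" ++ b ↔ a = b := by
  constructor
  · intro h
    have := congrArg String.toList h
    simp at this
    exact String.toList_inj.mp this
  · rintro rfl; rfl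

lemma append_lt_append (p a b : String) : p ++ a < p ++ b ↔ a < b := by
  rw [String.lt_iff_toList_lt, String.lt_iff_toList_lt]
  simp only [String.toList_append]
  induction p.toList with
  | nil => simp
  | cons c cs ih => simp [ih]

lemma sLeft_of_left (t : String) : PySem.Str.startswith ("Left" ++ t) "Left" = true := by
  simp [PySem.Chars.startswith_iff]

lemma sRight_of_right (t : String) : PySem.Str.startswith ("Right" ++ t) "Right" = true := by
  simp [PySem.Chars.startswith_iff]

lemma sRight_of_left (t : String) : PySem.Str.startswith ("Left" ++ t) "Right" = false := by
  rw [Bool.eq_false_iff]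
  intro h
  obtain ⟨u, hu⟩ := (sRight_iff _).mp h
  exact left_ne_right t u hu

-- ---- proof-side copy of A's fold body ----
def aStep (rights : PySem.Set String) :
    (List (String × String) × PySem.Set String × PySem.Set String) → String →
    (List (String × String) × PySem.Set String × PySem.Set String) :=
  fun st left =>
    let right := "Right" ++ pyRemoveprefix left "Left"
    if PySem.Set.contains rights right then
      (st.1 ++ [(left, right)], PySem.Set.add st.2.1 left, PySem.Set.add st.2.2 right)
    else st

def leftsOf (J : List String) : PySem.Set String :=
  PySem.Set.ofList (J.filter (fun n => PySem.Str.startswith n "Left"))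

def rightsOf (J : List String) : PySem.Set String :=
  PySem.Set.ofList (J.filter (fun n => PySem.Str.startswith n "Right"))

def lsOf (J : List String) : List String :=
  PySem.List.sorted
    (PySem.Set.ofList ((J.filter (fun n => PySem.Str.startswith n "Left")).map
      (fun n => String.ofList (n.toList.drop 4)))) (fun x => x) false

def rsOf (J : List String) : List String :=
  PySem.List.sorted
    (PySem.Set.ofList ((J.filter (fun n => PySem.Str.startswith n "Right")).map
      (fun n => String.ofList (n.toList.drop 5)))) (fun x => x) false

lemma A_unfold (J : List String) :
    classify_joints J =
      (let res := (PySem.List.sorted (leftsOf J) (fun x => x) false).foldl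
          (aStep (rightsOf J)) ([], PySem.Set.empty, PySem.Set.empty)
       (res.1, J.filter
          (fun n => !(PySem.Set.contains res.2.1 n) && !(PySem.Set.contains res.2.2 n)))) := rfl

lemma B_unfold (J : List String) :
    classify_joints_alt J =
      (let res := mergeLoop (lsOf J) (rsOf J) ([], PySem.Set.empty) 0 0
       (res.1, J.filter (fun n =>
         !(PySem.Str.startswith n "Left" &&
             PySem.Set.contains res.2 (String.ofList (n.toList.drop 4))) &&
         !(PySem.Str.startswith n "Right" &&
             PySem.Set.contains res.2 (String.ofList (n.toList.drop 5)))))) := rfl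

-- ---- structural version of the two-pointer merge ----
def mergeL : List String → List String → List String
  | [], _ => []
  | _ :: _, [] => []
  | a :: as, b :: bs =>
    if a = b then a :: mergeL as bs
    else if a < b then mergeL as (b :: bs)
    else mergeL (a :: as) bs

lemma drop_eq_getD_cons (l : List String) (i : Nat) (h : i < l.length) :
    l.drop i = l.getD i "" :: l.drop (i+1) := by
  rw [List.getD_eq_getElem l "" h]
  exact (List.drop_eq_getElem_cons h)

lemma mergeLoop_eq (ls rs : List String) :
    ∀ fuel i j p c, (ls.length - i) + (rs.length - j) ≤ fuel →
      mergeLoop ls rs (p, c) i j =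
        (p ++ (mergeL (ls.drop i) (rs.drop j)).map (fun s => ("Left" ++ s, "Right" ++ s)),
         PySem.Set.update c (mergeL (ls.drop i) (rs.drop j))) := by
  intro fuel
  induction fuel with
  | zero =>
    intro i j p c h
    have hi : ¬ i < ls.length := by omega
    have hj : ls.drop i = [] := List.drop_eq_nil_of_le (by omega)
    rw [mergeLoop]
    simp [hi, hj, mergeL, PySem.Set.update_nil]
  | succ m ih =>
    intro i j p c h
    rw [mergeLoop]
    by_cases hg : i < ls.length ∧ j < rs.length
    · rw [dif_pos hg, drop_eq_getD_cons ls i hg.1, drop_eq_getD_cons rs j hg.2]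
      by_cases hab : ls.getD i "" = rs.getD j ""
      · rw [if_pos hab, ih (i+1) (j+1) _ _ (by omega)]
        rw [show mergeL (ls.getD i "" :: ls.drop (i+1)) (rs.getD j "" :: rs.drop (j+1)) =
            ls.getD i "" :: mergeL (ls.drop (i+1)) (rs.drop (j+1)) from by
          simp only [mergeL]; rw [if_pos hab]]
        simp [PySem.Set.update_cons]
        simpa using hab.symm
      · rw [if_neg hab]
        by_cases hlt : ls.getD i "" < rs.getD j ""
        · rw [if_pos hlt, ih (i+1) j _ _ (by omega), drop_eq_getD_cons rs j hg.2]
          rw [show mergeL (ls.getD i "" :: ls.drop (i+1)) (rs.getD j "" :: rs.drop (j+1)) =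
              mergeL (ls.drop (i+1)) (rs.getD j "" :: rs.drop (j+1)) from by
            simp only [mergeL]; rw [if_neg hab, if_pos hlt]]
        · rw [if_neg hlt, ih i (j+1) _ _ (by omega), drop_eq_getD_cons ls i hg.1]
          rw [show mergeL (ls.getD i "" :: ls.drop (i+1)) (rs.getD j "" :: rs.drop (j+1)) =
              mergeL (ls.getD i "" :: ls.drop (i+1)) (rs.drop (j+1)) from by
            simp only [mergeL]; rw [if_neg hab, if_neg hlt]]
    · rw [dif_neg hg]
      rcases not_and_or.mp hg with hi | hj
      · have : ls.drop i = [] := List.drop_eq_nil_of_le (by omega)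
        simp [this, mergeL, PySem.Set.update_nil]
      · have hr : rs.drop j = [] := List.drop_eq_nil_of_le (by omega)
        cases hl : ls.drop i with
        | nil => simp [hr, mergeL, PySem.Set.update_nil]
        | cons x xs => simp [hr, mergeL, PySem.Set.update_nil]

-- merge of two strictly increasing lists is the sorted intersection
lemma mergeL_eq_filter :
    ∀ fuel (as bs : List String), as.length + bs.length ≤ fuel →
      as.Pairwise (· < ·) → bs.Pairwise (· < ·) →
      mergeL as bs = as.filter (fun a => decide (a ∈ bs)) := by
  intro fuel
  induction fuel with
  | zero =>
    intro as bs h _ _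
    have : as = [] := List.eq_nil_of_length_eq_zero (by omega)
    subst this; simp [mergeL]
  | succ m ih =>
    intro as bs h ha hb
    match as, bs with
    | [], _ => simp [mergeL]
    | x :: xs, [] => simp [mergeL]
    | a :: as', b :: bs' =>
      have ha' := List.pairwise_cons.mp ha
      have hb' := List.pairwise_cons.mp hb
      by_cases hab : a = b
      · subst hab
        rw [show mergeL (a :: as') (a :: bs') = a :: mergeL as' bs' from by
          simp only [mergeL]; simp]
        rw [ih as' bs' (by simp at h ⊢; omega) ha'.2 hb'.2]
        have : as'.filter (fun x => decide (x ∈ bs')) =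
            as'.filter (fun x => decide (x ∈ a :: bs')) := by
          refine (List.filter_congr (fun x hx => ?_)).symm
          have hax : a < x := ha'.1 x hx
          simp [List.mem_cons, (ne_of_gt hax)]
        simp [this]
      · by_cases hlt : a < b
        · rw [show mergeL (a :: as') (b :: bs') = mergeL as' (b :: bs') from by
            simp only [mergeL]; rw [if_neg hab, if_pos hlt]]
          rw [ih as' (b :: bs') (by simp at h ⊢; omega) ha'.2 hb]
          have hna : a ∉ b :: bs' := by
            simp only [List.mem_cons]
            rintro (rfl | hm)
            · exact hab rfl
            · exact absurd hlt (not_lt.mpr (le_of_lt (hb'.1 a hm)))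
          have hna' : ¬ a = b ∧ a ∉ bs' := by simpa [not_or] using hna
          simp [hna'.1, hna'.2]
        · rw [show mergeL (a :: as') (b :: bs') = mergeL (a :: as') bs' from by
            simp only [mergeL]; rw [if_neg hab, if_neg hlt]]
          rw [ih (a :: as') bs' (by simp at h ⊢; omega) ha hb'.2]
          have hba : b < a := lt_of_le_of_ne (not_lt.mp hlt) (Ne.symm hab)
          refine (List.filter_congr (fun x hx => ?_)).symm
          have hbx : b < x := by
            rcases List.mem_cons.mp hx with rfl | hm
            · exact hba
            · exact lt_trans hba (ha'.1 x hm)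
          simp [List.mem_cons, (ne_of_gt hbx)]

-- ---- characterization of the two sorted suffix lists ----
lemma mem_lsOf (J : List String) (s : String) : s ∈ lsOf J ↔ ("Left" ++ s) ∈ J := by
  rw [lsOf, PySem.List.mem_sorted, PySem.Set.mem_ofList, List.mem_map]
  constructor
  · rintro ⟨n, hn, rfl⟩
    rw [List.mem_filter] at hn
    obtain ⟨t, rfl⟩ := (sLeft_iff n).mp hn.2
    rw [sfx_left]; exact hn.1
  · intro h
    exact ⟨"Left" ++ s, List.mem_filter.mpr ⟨h, sLeft_of_left s⟩, sfx_left s⟩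

lemma mem_rsOf (J : List String) (s : String) : s ∈ rsOf J ↔ ("Right" ++ s) ∈ J := by
  rw [rsOf, PySem.List.mem_sorted, PySem.Set.mem_ofList, List.mem_map]
  constructor
  · rintro ⟨n, hn, rfl⟩
    rw [List.mem_filter] at hn
    obtain ⟨t, rfl⟩ := (sRight_iff n).mp hn.2
    rw [sfx_right]; exact hn.1
  · intro h
    exact ⟨"Right" ++ s, List.mem_filter.mpr ⟨h, sRight_of_right s⟩, sfx_right s⟩

lemma lsOf_lt (J : List String) : (lsOf J).Pairwise (· < ·) :=
  PySem.List.sorted_ofList_pairwise_lt _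

lemma rsOf_lt (J : List String) : (rsOf J).Pairwise (· < ·) :=
  PySem.List.sorted_ofList_pairwise_lt _

-- the merged common-suffix list
def Kf (J : List String) : List String :=
  (lsOf J).filter (fun s => decide (("Left" ++ s) ∈ J ∧ ("Right" ++ s) ∈ J))

lemma mergeL_eq_Kf (J : List String) : mergeL (lsOf J) (rsOf J) = Kf J := by
  rw [mergeL_eq_filter ((lsOf J).length + (rsOf J).length) _ _ le_rfl (lsOf_lt J) (rsOf_lt J)]
  refine List.filter_congr (fun s hs => ?_)
  rw [mem_lsOf] at hs
  simp [mem_rsOf, hs]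

lemma Kf_lt (J : List String) : (Kf J).Pairwise (· < ·) := (lsOf_lt J).filter _

lemma mem_Kf (J : List String) (s : String) :
    s ∈ Kf J ↔ ("Left" ++ s) ∈ J ∧ ("Right" ++ s) ∈ J := by
  rw [Kf, List.mem_filter, mem_lsOf, decide_eq_true_iff]
  tauto

-- ---- closed form of A's accumulation loop ----
lemma foldl3 {α β γ : Type} [BEq γ] (l : List α) (c : α → Bool) (f : α → β)
    (g h : α → γ) (p0 : List β) (m1 m2 : PySem.Set γ) :
    l.foldl (fun st x =>
        if c x then (st.1 ++ [f x], PySem.Set.add st.2.1 (g x), PySem.Set.add st.2.2 (h x))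
        else st) (p0, m1, m2)
    = (p0 ++ (l.filter c).map f,
       m1.update ((l.filter c).map g), m2.update ((l.filter c).map h)) := by
  induction l generalizing p0 m1 m2 with
  | nil => simp [PySem.Set.update_nil]
  | cons x xs ih =>
    by_cases hc : c x
    · simp [hc, ih, PySem.Set.update_cons]
    · simp [hc, ih]

-- abbreviations for A's iterated (sorted, filtered) lefts list
def RpartOf (l : String) : String := "Right" ++ String.ofList (l.toList.drop 4)

def LAf (J : List String) : List String :=
  (PySem.List.sorted (leftsOf J) (fun x => x) false).filter
    (fun l => PySem.Set.contains (rightsOf J) (RpartOf l))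

lemma contains_rightsOf (J : List String) (t : String) :
    PySem.Set.contains (rightsOf J) ("Right" ++ t) = decide (("Right" ++ t) ∈ J) := by
  by_cases h : ("Right" ++ t) ∈ J
  · simp only [h, decide_true]
    rw [PySem.Set.contains_iff, rightsOf, PySem.Set.mem_ofList, List.mem_filter]
    exact ⟨h, sRight_of_right t⟩
  · simp only [h, decide_false]
    rw [Bool.eq_false_iff, Ne, PySem.Set.contains_iff]
    simp [rightsOf, PySem.Set.mem_ofList, List.mem_filter, h]

-- central fact: A's sorted matched lefts are the merged suffixes with "Left" glued on
lemma LAf_eq_map_Kf (J : List String) :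
    LAf J = (Kf J).map (fun s => "Left" ++ s) := by
  have hlt1 : (LAf J).Pairwise (· < ·) :=
    (PySem.List.sorted_ofList_pairwise_lt _).filter _
  have hnd1 : (LAf J).Nodup := hlt1.imp (fun h => ne_of_lt h)
  have hndK : (Kf J).Nodup := (Kf_lt J).imp (fun h => ne_of_lt h)
  have hlt2 : ((Kf J).map (fun s => "Left" ++ s)).Pairwise (· < ·) := by
    rw [List.pairwise_map]
    exact (Kf_lt J).imp (fun h => (append_lt_append _ _ _).mpr h)
  have hnd2 : ((Kf J).map (fun s => "Left" ++ s)).Nodup :=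
    hndK.map (fun a b h => left_inj.mp h)
  have hmem : ∀ x, x ∈ LAf J ↔ x ∈ (Kf J).map (fun s => "Left" ++ s) := by
    intro x
    constructor
    · intro hx
      rw [LAf, List.mem_filter, PySem.List.mem_sorted] at hx
      obtain ⟨hxl, hxc⟩ := hx
      rw [leftsOf, PySem.Set.mem_ofList, List.mem_filter] at hxl
      obtain ⟨t, rfl⟩ := (sLeft_iff x).mp hxl.2
      rw [RpartOf, sfx_left, contains_rightsOf, decide_eq_true_iff] at hxc
      refine List.mem_map.mpr ⟨t, ?_, rfl⟩
      rw [mem_Kf]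
      exact ⟨hxl.1, hxc⟩
    · intro hx
      obtain ⟨t, ht, rfl⟩ := List.mem_map.mp hx
      rw [mem_Kf] at ht
      rw [LAf, List.mem_filter, PySem.List.mem_sorted, RpartOf, sfx_left,
        contains_rightsOf]
      refine ⟨?_, by simp [ht.2]⟩
      rw [leftsOf, PySem.Set.mem_ofList, List.mem_filter]
      exact ⟨ht.1, sLeft_of_left t⟩
  have hperm : (LAf J).Perm ((Kf J).map (fun s => "Left" ++ s)) :=
    (List.perm_ext_iff_of_nodup hnd1 hnd2).mpr hmem
  exact List.Perm.eq_of_pairwise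
    (fun a b _ _ h1 h2 => absurd h1 (lt_asymm h2)) hlt1 hlt2 hperm

-- rewrite A's loop body on members of the sorted lefts list
lemma aStep_eq (J : List String) (st : List (String × String) × PySem.Set String × PySem.Set String)
    (l : String) (hl : l ∈ PySem.List.sorted (leftsOf J) (fun x => x) false) :
    aStep (rightsOf J) st l =
      (fun st (x : String) =>
        if PySem.Set.contains (rightsOf J) (RpartOf x) then
          (st.1 ++ [(x, RpartOf x)],
           PySem.Set.add st.2.1 x, PySem.Set.add st.2.2 (RpartOf x))
        else st) st l := by
  rw [PySem.List.mem_sorted, leftsOf, PySem.Set.mem_ofList, List.mem_filter] at hl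
  have : "Right" ++ pyRemoveprefix l "Left" = RpartOf l := by
    rw [pyRemoveprefix, if_pos hl.2, RpartOf]
    norm_num [show ("Left" : String).length = 4 from rfl]
  rw [aStep]
  simp only [this]

lemma Rpart_map (J : List String) :
    (LAf J).map RpartOf = (Kf J).map (fun s => "Right" ++ s) := by
  rw [LAf_eq_map_Kf, List.map_map]
  refine List.map_congr_left (fun s _ => ?_)
  simp [RpartOf]

lemma pairs_eq (J : List String) :
    (LAf J).map (fun l => (l, RpartOf l)) =
      (Kf J).map (fun s => ("Left" ++ s, "Right" ++ s)) := by
  rw [LAf_eq_map_Kf, List.map_map]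
  refine List.map_congr_left (fun s _ => ?_)
  simp [RpartOf]

-- membership of a name in A's two matched sets, as suffix conditions
lemma mem_mapL_iff (J : List String) (n : String) :
    n ∈ (Kf J).map (fun s => "Left" ++ s) ↔
      PySem.Str.startswith n "Left" = true ∧
        String.ofList (n.toList.drop 4) ∈ Kf J := by
  rw [List.mem_map]
  constructor
  · rintro ⟨s, hs, rfl⟩
    exact ⟨sLeft_of_left s, by rw [sfx_left]; exact hs⟩
  · rintro ⟨h1, h2⟩
    obtain ⟨t, rfl⟩ := (sLeft_iff n).mp h1
    rw [sfx_left] at h2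
    exact ⟨t, h2, rfl⟩

lemma mem_mapR_iff (J : List String) (n : String) :
    n ∈ (Kf J).map (fun s => "Right" ++ s) ↔
      PySem.Str.startswith n "Right" = true ∧
        String.ofList (n.toList.drop 5) ∈ Kf J := by
  rw [List.mem_map]
  constructor
  · rintro ⟨s, hs, rfl⟩
    exact ⟨sRight_of_right s, by rw [sfx_right]; exact hs⟩
  · rintro ⟨h1, h2⟩
    obtain ⟨t, rfl⟩ := (sRight_iff n).mp h1
    rw [sfx_right] at h2
    exact ⟨t, h2, rfl⟩

-- ===== main proof =====
lemma main_eq (J : List String) : classify_joints J = classify_joints_alt J := by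
  rw [A_unfold, B_unfold]
  rw [PySem.List.foldl_congr_mem _ _ _ _ (fun st l hl => aStep_eq J st l hl)]
  rw [foldl3]
  rw [mergeLoop_eq (lsOf J) (rsOf J) ((lsOf J).length + (rsOf J).length) 0 0 _ _ (by omega)]
  simp only [List.drop_zero, mergeL_eq_Kf, List.nil_append]
  have hLAf : (PySem.List.sorted (leftsOf J) (fun x => x) false).filter
      (fun l => PySem.Set.contains (rightsOf J) (RpartOf l)) = LAf J := rfl
  rw [hLAf]
  refine Prod.ext ?_ ?_
  · simpa using pairs_eq J
  · simp only []
    refine List.filter_congr (fun n _ => ?_)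
    have e1 : PySem.Set.contains (PySem.Set.update PySem.Set.empty
          (List.map (fun x => x) (LAf J))) n =
        decide (n ∈ (Kf J).map (fun s => "Left" ++ s)) := by
      rw [PySem.Set.update_empty, List.map_id', LAf_eq_map_Kf]
      by_cases h : n ∈ (Kf J).map (fun s => "Left" ++ s)
      · simp only [h, decide_true]
        exact (PySem.Set.contains_iff _ _).mpr ((PySem.Set.mem_ofList _ _).mpr h)
      · simp only [h, decide_false]
        rw [Bool.eq_false_iff, Ne, PySem.Set.contains_iff, PySem.Set.mem_ofList]
        exact h
    have e2 : PySem.Set.contains (PySem.Set.update PySem.Set.empty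
          (List.map RpartOf (LAf J))) n =
        decide (n ∈ (Kf J).map (fun s => "Right" ++ s)) := by
      rw [PySem.Set.update_empty, Rpart_map]
      by_cases h : n ∈ (Kf J).map (fun s => "Right" ++ s)
      · simp only [h, decide_true]
        exact (PySem.Set.contains_iff _ _).mpr ((PySem.Set.mem_ofList _ _).mpr h)
      · simp only [h, decide_false]
        rw [Bool.eq_false_iff, Ne, PySem.Set.contains_iff, PySem.Set.mem_ofList]
        exact h
    have e3 : ∀ s, PySem.Set.contains (PySem.Set.update PySem.Set.empty (Kf J)) s =
        decide (s ∈ Kf J) := by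
      intro s
      rw [PySem.Set.update_empty]
      by_cases h : s ∈ Kf J
      · simp only [h, decide_true]
        exact (PySem.Set.contains_iff _ _).mpr ((PySem.Set.mem_ofList _ _).mpr h)
      · simp only [h, decide_false]
        rw [Bool.eq_false_iff, Ne, PySem.Set.contains_iff, PySem.Set.mem_ofList]
        exact h
    rw [e1, e2, e3, e3]
    by_cases hL : PySem.Str.startswith n "Left" = true
    · obtain ⟨t, rfl⟩ := (sLeft_iff n).mp hL
      have hR := sRight_of_left t
      simp [mem_mapL_iff, mem_mapR_iff]
    · by_cases hR : PySem.Str.startswith n "Right" = true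
      · simp [mem_mapL_iff, mem_mapR_iff]
      · simp [mem_mapL_iff, mem_mapR_iff]

-- ===== VERDICT (by name: the statement is the Claim_ definition above) =====
theorem classify_joints_spec : Claim_equal_classify_joints := by
  intro J _
  unfold Spec_classify_joints
  exact main_eq J
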